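-- pv_equiv track=rewrite | github.com/GorkyAnge/Ejercicios-Python | Sección 17/Ejercicio 52.py | item_in_common
-- ===== SOURCE A (Python) =====
-- def item_in_common(list1, list2):
--     item_dict = {}
--     for item in list1:
--         item_dict[item] = True
--     for item in list2:
--         if item in item_dict:
--             return True
--     return False
--
-- list1 = [1, 3, 5]
--
-- list2 = [2, 4, 5]
-- ===== SOURCE B (Python) =====
-- def item_in_common(list1, list2):
--     a = sorted(list1)
--     b = sorted(list2)
--     i = 0
--     j = 0
--     while i < len(a) and j < len(b):
--         if a[i] == b[j]:
--             return True
--         if a[i] < b[j]: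
--             i += 1
--         else:
--             j += 1
--     return False
-- ===== Notes on version B (the rewrite author's own statement) =====
-- stated objective: alternative
-- what changed: Replaces A's hash-dict build plus membership scan with a sort-both-lists two-pointer merge walk that advances the pointer holding the smaller value; no hashing or membership tests at all.
import Mathlib
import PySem

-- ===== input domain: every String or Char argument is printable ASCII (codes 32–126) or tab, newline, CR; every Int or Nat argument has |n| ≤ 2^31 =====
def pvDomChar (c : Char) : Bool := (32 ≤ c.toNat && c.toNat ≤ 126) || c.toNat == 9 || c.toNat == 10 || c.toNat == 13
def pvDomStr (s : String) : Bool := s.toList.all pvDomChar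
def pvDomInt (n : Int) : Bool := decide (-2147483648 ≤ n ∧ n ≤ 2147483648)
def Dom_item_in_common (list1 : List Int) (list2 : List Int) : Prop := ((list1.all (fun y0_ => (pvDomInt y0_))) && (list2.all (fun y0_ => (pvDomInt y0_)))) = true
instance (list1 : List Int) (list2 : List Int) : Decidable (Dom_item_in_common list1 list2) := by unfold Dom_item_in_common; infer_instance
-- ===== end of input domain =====

-- B replaces A's hash-dict build plus membership scan with a sort-both-lists two-pointer merge walk (alternative algorithm, no hashing).

-- ===== PORT A =====
-- the second loop: 'for item in list2: if item in item_dict: return True' then 'return False'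
def itemScan (d : PySem.Dict Int Bool) : List Int → Bool
  | [] => false
  | x :: rest => if d.contains x then true else itemScan d rest

def item_in_common (list1 : List Int) (list2 : List Int) : Bool :=
  let item_dict := list1.foldl (fun d item => d.insert item true) PySem.Dict.empty
  itemScan item_dict list2

-- ===== PORT B =====
-- the while-loop with two index pointers, as structural recursion on the two sorted lists
def twoPointer : List Int → List Int → Bool
  | [], _ => false
  | _ :: _, [] => false
  | x :: xs, y :: ys =>
    if x = y then true
    else if x < y then twoPointer xs (y :: ys)
    else twoPointer (x :: xs) ys
termination_by a b => a.length + b.length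

def item_in_common_alt (list1 : List Int) (list2 : List Int) : Bool :=
  twoPointer (PySem.List.sorted list1 (fun x => x) false) (PySem.List.sorted list2 (fun x => x) false)

-- ===== PRECONDITION & SPEC =====
def Spec_item_in_common (list1 : List Int) (list2 : List Int) (out : Bool) : Prop := out = item_in_common_alt list1 list2
instance (list1 : List Int) (list2 : List Int) (out : Bool) : Decidable (Spec_item_in_common list1 list2 out) := by unfold Spec_item_in_common; infer_instance

-- ===== CLAIM (what is proved, stated in full; the proofs are below) =====
def Claim_equal_item_in_common : Prop := ∀ (list1 : List Int) (list2 : List Int), Dom_item_in_common list1 list2 → Spec_item_in_common list1 list2 (item_in_common list1 list2)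

-- ===== LEMMAS AND PROOFS =====
theorem itemScan_eq_any (d : PySem.Dict Int Bool) (xs : List Int) :
    itemScan d xs = xs.any (fun x => d.contains x) := by
  induction xs with
  | nil => rfl
  | cons x rest ih =>
    simp only [itemScan, List.any_cons]
    by_cases h : d.contains x = true
    · simp [h]
    · simp [h, ih]

theorem contains_build_dict (list1 : List Int) (x : Int) :
    (list1.foldl (fun d item => d.insert item true) PySem.Dict.empty).contains x = decide (x ∈ list1) := by
  rw [PySem.Dict.contains_eq_decide_mem_keys, PySem.Dict.keys_foldl_insert]
  simp

-- on sorted inputs the two-pointer walk decides the existence of a common element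
theorem twoPointer_eq (xs : List Int) :
    ∀ ys : List Int, xs.Pairwise (· ≤ ·) → ys.Pairwise (· ≤ ·) →
      twoPointer xs ys = decide (∃ v, v ∈ xs ∧ v ∈ ys) := by
  induction xs with
  | nil => intro ys _ _; simp [twoPointer]
  | cons x xs ihx =>
    intro ys
    induction ys with
    | nil => intro _ _; simp [twoPointer]
    | cons y ys ihy =>
      intro hx hy
      simp only [twoPointer]
      by_cases hxy : x = y
      · subst hxy
        simp
      · simp only [hxy, if_false]
        by_cases hlt : x < y
        · simp only [hlt, if_true]
          rw [ihx (y :: ys) (List.Pairwise.of_cons hx) hy]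
          have hnot : x ∉ y :: ys := by
            intro hm
            rcases List.mem_cons.mp hm with h | h
            · exact hxy h
            · have := (List.pairwise_cons.mp hy).1 x h
              omega
          rw [decide_eq_decide]
          constructor
          · rintro ⟨v, hv1, hv2⟩; exact ⟨v, List.mem_cons_of_mem _ hv1, hv2⟩
          · rintro ⟨v, hv1, hv2⟩
            rcases List.mem_cons.mp hv1 with h | h
            · subst h; exact absurd hv2 hnot
            · exact ⟨v, h, hv2⟩
        · simp only [hlt, if_false]
          have hyx : y < x := by omega
          rw [ihy hx (List.Pairwise.of_cons hy)]
          have hnot : y ∉ x :: xs := by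
            intro hm
            rcases List.mem_cons.mp hm with h | h
            · exact hxy h.symm
            · have := (List.pairwise_cons.mp hx).1 y h
              omega
          rw [decide_eq_decide]
          constructor
          · rintro ⟨v, hv1, hv2⟩; exact ⟨v, hv1, List.mem_cons_of_mem _ hv2⟩
          · rintro ⟨v, hv1, hv2⟩
            rcases List.mem_cons.mp hv2 with h | h
            · subst h; exact absurd hv1 hnot
            · exact ⟨v, hv1, h⟩

-- ===== VERDICT (by name: the statement is the Claim_ definition above) =====
theorem item_in_common_spec : Claim_equal_item_in_common := by
  intro list1 list2 _
  unfold Spec_item_in_common item_in_common item_in_common_alt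
  rw [itemScan_eq_any,
      twoPointer_eq _ _ (PySem.List.sorted_pairwise list1 (fun x => x))
        (PySem.List.sorted_pairwise list2 (fun x => x))]
  simp only [PySem.List.mem_sorted, contains_build_dict]
  rcases h : list2.any (fun x => decide (x ∈ list1)) with _ | _
  · simp only [List.any_eq_false, decide_eq_true_eq] at h
    symm
    simp only [decide_eq_false_iff_not]
    rintro ⟨v, hv1, hv2⟩
    exact absurd hv1 (by simpa using h v hv2)
  · simp only [List.any_eq_true, decide_eq_true_eq] at h
    obtain ⟨v, hv2, hv1⟩ := h
    symm
    simp only [decide_eq_true_eq]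
    exact ⟨v, hv1, hv2⟩
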